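-- pv_equiv track=rewrite | github.com/juliano-xd/scout | advanced_tracking_engine.py | _detect_method_chain
-- ===== SOURCE A (Python) =====
-- from typing import Any, Dict, List, Optional, Set, Tuple
--
-- def _detect_method_chain(lines: List[str], method: str) -> bool:
--     """Detecta encadeamento de métodos (builder pattern, StringBuilder, etc.)."""
--     chain_patterns = [
--         "Ljava/lang/StringBuilder;->append",
--         "Ljava/lang/StringBuilder;->toString",
--         "Ljava/lang/StringBuffer;->append",
--         "Ljava/lang/StringBuffer;->toString",
--         "Ljava/lang/String;->concat",
--         "Ljava/lang/String;->valueOf",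
--         "Lokhttp3/Request$Builder;->url",
--         "Lokhttp3/Request$Builder;->post",
--         "Lokhttp3/Request$Builder;->build",
--         "Landroid/content/Intent;->putExtra",
--         "Landroid/os/Bundle;->putString",
--     ]
--
--     for line in lines:
--         for pattern in chain_patterns:
--             if pattern in line:
--                 return True
--     return False
-- ===== SOURCE B (Python) =====
-- import re
-- from typing import List
--
-- _CHAIN_PATTERNS = [
--     "Ljava/lang/StringBuilder;->append",
--     "Ljava/lang/StringBuilder;->toString",
--     "Ljava/lang/StringBuffer;->append",
--     "Ljava/lang/StringBuffer;->toString",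
--     "Ljava/lang/String;->concat",
--     "Ljava/lang/String;->valueOf",
--     "Lokhttp3/Request$Builder;->url",
--     "Lokhttp3/Request$Builder;->post",
--     "Lokhttp3/Request$Builder;->build",
--     "Landroid/content/Intent;->putExtra",
--     "Landroid/os/Bundle;->putString",
-- ]
--
-- # One compiled alternation of all (escaped) literal patterns; a single
-- # automaton search over the '\n'-joined text replaces the nested loops.
-- # (No pattern contains '\n', so a match never spans the inserted separators.)
-- _CHAIN_RX = re.compile("|".join(map(re.escape, _CHAIN_PATTERNS)))
--
--
-- def _detect_method_chain(lines: List[str], method: str) -> bool: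
--     """Detecta encadeamento de métodos (builder pattern, StringBuilder, etc.)."""
--     return _CHAIN_RX.search("\n".join(lines)) is not None
-- ===== Notes on version B (the rewrite author's own statement) =====
-- stated objective: faster
-- what changed: Replaced the explicit nested per-line/per-pattern substring loops by a single precompiled regex (alternation of the re.escape'd literal patterns) searched once over the '\n'-joined text; no pattern contains a newline, so a match never spans the inserted separators.
import Mathlib
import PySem

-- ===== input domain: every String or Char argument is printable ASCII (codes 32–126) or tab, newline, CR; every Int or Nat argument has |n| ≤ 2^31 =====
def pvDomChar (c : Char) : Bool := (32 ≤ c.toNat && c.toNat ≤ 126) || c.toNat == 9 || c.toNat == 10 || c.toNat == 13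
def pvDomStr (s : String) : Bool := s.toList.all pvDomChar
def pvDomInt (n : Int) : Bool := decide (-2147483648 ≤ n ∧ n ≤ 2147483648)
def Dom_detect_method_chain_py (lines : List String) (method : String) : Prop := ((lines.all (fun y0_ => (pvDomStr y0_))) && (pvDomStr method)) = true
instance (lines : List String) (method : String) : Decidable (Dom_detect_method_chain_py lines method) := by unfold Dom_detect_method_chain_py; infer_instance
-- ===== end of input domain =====

-- B replaces A's nested per-line/per-pattern substring loops by one search of the
-- '\n'-joined text for the alternation of the literal patterns (idiomatic: one
-- compiled regex search in Python).  Return values agree on all inputs.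

-- ===== PORT A =====
def chainPatternsA : List String :=
  [ "Ljava/lang/StringBuilder;->append",
    "Ljava/lang/StringBuilder;->toString",
    "Ljava/lang/StringBuffer;->append",
    "Ljava/lang/StringBuffer;->toString",
    "Ljava/lang/String;->concat",
    "Ljava/lang/String;->valueOf",
    "Lokhttp3/Request$Builder;->url",
    "Lokhttp3/Request$Builder;->post",
    "Lokhttp3/Request$Builder;->build",
    "Landroid/content/Intent;->putExtra",
    "Landroid/os/Bundle;->putString" ]

-- inner loop: 'for pattern in chain_patterns: if pattern in line: return True'
def detectInnerA : List String → String → Bool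
  | [], _ => false
  | p :: ps, line => if PySem.Str.isIn p line then true else detectInnerA ps line

-- outer loop: 'for line in lines: …'
def detectOuterA : List String → Bool
  | [] => false
  | line :: rest => if detectInnerA chainPatternsA line then true else detectOuterA rest

def detect_method_chain_py (lines : List String) (method : String) : Bool :=
  detectOuterA lines

-- ===== PORT B =====
def chainPatternsB : List String :=
  ["Ljava/lang/StringBuilder;->append", "Ljava/lang/StringBuilder;->toString", "Ljava/lang/StringBuffer;->append", "Ljava/lang/StringBuffer;->toString", "Ljava/lang/String;->concat", "Ljava/lang/String;->valueOf", "Lokhttp3/Request$Builder;->url", "Lokhttp3/Request$Builder;->post", "Lokhttp3/Request$Builder;->build", "Landroid/content/Intent;->putExtra", "Landroid/os/Bundle;->putString"]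

-- '_CHAIN_RX.search("\n".join(lines))': the regex is the alternation of the escaped
-- literal patterns, so a successful search = some pattern occurs in the joined text.
def detect_method_chain_py_alt (lines : List String) (method : String) : Bool :=
  chainPatternsB.any (fun p => PySem.Str.isIn p (PySem.Str.join "\n" lines))

-- ===== PRECONDITION & SPEC =====
def Spec_detect_method_chain_py (lines : List String) (method : String) (out : Bool) : Prop := out = detect_method_chain_py_alt lines method
instance (lines : List String) (method : String) (out : Bool) : Decidable (Spec_detect_method_chain_py lines method out) := by unfold Spec_detect_method_chain_py; infer_instance

-- ===== CLAIM (what is proved, stated in full; the proofs are below) =====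
def Claim_equal_detect_method_chain_py : Prop := ∀ (lines : List String) (method : String), Dom_detect_method_chain_py lines method → Spec_detect_method_chain_py lines method (detect_method_chain_py lines method)

-- ===== LEMMAS AND PROOFS =====

theorem infix_split {sub x y : List Char} {c : Char} (hc : c ∉ sub)
    (h : sub <:+: x ++ c :: y) : sub <:+: x ∨ sub <:+: y := by
  rw [← PySem.Chars.isIn_iff_infix, ← PySem.Chars.exists_prefix_drop_iff_isIn] at h
  obtain ⟨j, hp⟩ := h
  rw [List.drop_append] at hp
  rcases le_or_gt j x.length with hj | hj
  · have hz : j - x.length = 0 := by omega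
    rw [hz, List.drop_zero] at hp
    by_cases hl : sub.length ≤ (List.drop j x).length
    · left
      rw [List.prefix_iff_eq_take] at hp
      have hs : sub = List.take sub.length (List.drop j x) := by
        conv_lhs => rw [hp]
        rw [List.take_append_of_le_length hl]
      have hpre : sub <+: List.drop j x := by
        rw [hs]; exact List.take_prefix _ _
      exact hpre.isInfix.trans (List.drop_suffix j x).isInfix
    · exfalso
      have hk : (List.drop j x).length < sub.length := by omega
      have hk' : x.length - j < sub.length := by simpa using hk
      have h2 : sub[x.length - j]'hk' = c := by
        have h3 := hp.getElem (i := (List.drop j x).length) hk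
        rw [List.getElem_append_right (le_refl _)] at h3
        simpa using h3
      exact hc (h2 ▸ List.getElem_mem hk')
  · right
    have hx : List.drop j x = [] := List.drop_eq_nil_of_le (by omega)
    rw [hx, List.nil_append] at hp
    have hd : List.drop (j - x.length) (c :: y) = List.drop (j - x.length - 1) y := by
      have he : j - x.length = (j - x.length - 1) + 1 := by omega
      rw [he]; rfl
    rw [hd] at hp
    exact hp.isInfix.trans (List.drop_suffix _ y).isInfix

theorem isIn_join {sub : List Char} {c : Char} (hc : c ∉ sub) (hne : sub ≠ [])
    (parts : List (List Char)) :
    PySem.Chars.isIn sub (PySem.Chars.join [c] parts) = true ↔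
      ∃ l ∈ parts, PySem.Chars.isIn sub l = true := by
  induction parts with
  | nil =>
    simp [PySem.Chars.join_nil, PySem.Chars.isIn_iff_infix, List.infix_nil, hne]
  | cons p rest ih =>
    cases rest with
    | nil => simp [PySem.Chars.join_singleton]
    | cons q rest' =>
      rw [PySem.Chars.join_cons_cons]
      constructor
      · intro h
        rw [PySem.Chars.isIn_iff_infix] at h
        have h' : sub <:+: p ++ c :: PySem.Chars.join [c] (q :: rest') := by
          simpa [List.append_assoc] using h
        rcases infix_split hc h' with h1 | h2
        · exact ⟨p, by simp, (PySem.Chars.isIn_iff_infix _ _).mpr h1⟩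
        · obtain ⟨l, hl, hin⟩ := ih.mp ((PySem.Chars.isIn_iff_infix _ _).mpr h2)
          exact ⟨l, by simp [hl], hin⟩
      · rintro ⟨l, hl, hin⟩
        rw [PySem.Chars.isIn_iff_infix, List.append_assoc]
        simp only [List.mem_cons] at hl
        rcases hl with rfl | hl
        · exact ((PySem.Chars.isIn_iff_infix _ _).mp hin).trans (List.prefix_append _ _).isInfix
        · have hJ := ih.mpr ⟨l, by simpa using hl, hin⟩
          exact ((PySem.Chars.isIn_iff_infix _ _).mp hJ).trans
            (((List.suffix_cons c _).trans (List.suffix_append _ _)).isInfix)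

theorem detectInnerA_eq_any (ps : List String) (line : String) :
    detectInnerA ps line = ps.any (fun p => PySem.Str.isIn p line) := by
  induction ps with
  | nil => rfl
  | cons p ps ih => simp [detectInnerA, ih, Bool.if_true_left]

theorem detectOuterA_eq_any (lines : List String) :
    detectOuterA lines = lines.any (fun l => detectInnerA chainPatternsA l) := by
  induction lines with
  | nil => rfl
  | cons l rest ih => simp [detectOuterA, ih, Bool.if_true_left]

-- every pattern is nonempty and newline-free (so no match can span the joined '\n')
theorem chainPatterns_ok :
    ∀ p ∈ chainPatternsA, ('\n' ∉ p.toList ∧ p.toList ≠ []) := by decide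

theorem chainPatternsB_eq : chainPatternsB = chainPatternsA := by rfl

-- ===== VERDICT (by name: the statement is the Claim_ definition above) =====
theorem detect_method_chain_py_spec : Claim_equal_detect_method_chain_py := by
  intro lines method _
  unfold Spec_detect_method_chain_py detect_method_chain_py detect_method_chain_py_alt
  rw [chainPatternsB_eq, detectOuterA_eq_any]
  rw [Bool.eq_iff_iff]
  simp only [List.any_eq_true, detectInnerA_eq_any]
  constructor
  · rintro ⟨l, hl, p, hp, hin⟩
    refine ⟨p, hp, ?_⟩
    obtain ⟨hnl, hne⟩ := chainPatterns_ok p hp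
    rw [PySem.Str.isIn_eq, PySem.Str.toList_join]
    rw [PySem.Str.isIn_eq] at hin
    exact (isIn_join hnl hne _).mpr ⟨l.toList, List.mem_map_of_mem hl, hin⟩
  · rintro ⟨p, hp, hin⟩
    obtain ⟨hnl, hne⟩ := chainPatterns_ok p hp
    rw [PySem.Str.isIn_eq, PySem.Str.toList_join] at hin
    obtain ⟨lt, hlt, hin'⟩ := (isIn_join hnl hne _).mp hin
    obtain ⟨l, hl, rfl⟩ := List.mem_map.mp hlt
    exact ⟨l, hl, p, hp, by rw [PySem.Str.isIn_eq]; exact hin'⟩
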